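-- pv_equiv track=rewrite | github.com/exoji2e/aoc20 | 24/day24.py | parse_tile
-- ===== SOURCE A (Python) =====
-- def parse_tile(tile):
--     i = 0
--     path = []
--     D = {'se': (1, 1), 'sw' : (1, -1), 'ne': (-1, 1), 'nw' : (-1, -1)}
--     while i < len(tile):
--         if tile[i] == 'e':
--             path.append((0, 2))
--             i += 1
--             continue
--         if tile[i] == 'w':
--             path.append((0, -2))
--             i += 1
--             continue
--         path.append(D[tile[i:i+2]])
--         i += 2
--     return path
-- ===== SOURCE B (Python) =====
-- COL = {'e': 1, 'w': -1}
--
-- def parse_tile(tile):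
--     # single left-to-right pass: 'n'/'s' is remembered as a pending row offset,
--     # each 'e'/'w' emits one step (a full-width step of 2 when no row is pending)
--     out = []
--     row = 0
--     for c in tile:
--         if c == 'n':
--             row = -1
--         elif c == 's':
--             row = 1
--         else:
--             col = COL[c]
--             out.append((row, col if row else 2 * col))
--             row = 0
--     return out
-- ===== Notes on version B (the rewrite author's own statement) =====
-- stated objective: simpler
-- what changed: B replaces A's index/slice loop with dict lookup of two-character substrings by a single character-at-a-time pass keeping a pending north/south offset, emitting a step on each 'e'/'w'.
import Mathlib
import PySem

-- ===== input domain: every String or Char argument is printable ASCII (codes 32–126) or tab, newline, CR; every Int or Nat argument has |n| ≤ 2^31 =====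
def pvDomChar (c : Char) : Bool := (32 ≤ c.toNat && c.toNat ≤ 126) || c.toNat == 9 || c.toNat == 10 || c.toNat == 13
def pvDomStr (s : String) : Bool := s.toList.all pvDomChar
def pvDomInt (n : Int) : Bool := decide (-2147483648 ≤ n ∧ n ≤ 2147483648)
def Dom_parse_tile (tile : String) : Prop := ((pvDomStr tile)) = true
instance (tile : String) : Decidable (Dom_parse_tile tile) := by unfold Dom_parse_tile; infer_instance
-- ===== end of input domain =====

-- B replaces A's index/slice loop with dict lookups by a single character pass
-- keeping a pending north/south offset (objective: simpler).

-- ===== PORT A =====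
-- A's dict D (insertion order preserved)
def pvDictA : PySem.Dict String (Int × Int) :=
  PySem.Dict.ofList [("se", (1, 1)), ("sw", (1, -1)), ("ne", (-1, 1)), ("nw", (-1, -1))]

-- A's while loop over index i, transcribed as recursion on the unread suffix:
-- one char consumed for 'e'/'w', otherwise the two-char slice tile[i:i+2] is
-- looked up in D (a missing key is Python's KeyError: the port stops; such
-- inputs are outside Pre_parse_tile).
def pvLoopA : List Char → List (Int × Int)
  | [] => []
  | [c] =>
    if c = 'e' then [(0, 2)]
    else if c = 'w' then [(0, -2)]
    else
      match pvDictA.get? (String.ofList [c]) with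
      | some v => [v]
      | none => []             -- KeyError in Python (always: keys have 2 chars)
  | c :: d :: rest =>
    if c = 'e' then (0, 2) :: pvLoopA (d :: rest)
    else if c = 'w' then (0, -2) :: pvLoopA (d :: rest)
    else
      match pvDictA.get? (String.ofList [c, d]) with
      | some v => v :: pvLoopA rest
      | none => []             -- KeyError in Python

def parse_tile (tile : String) : List (Int × Int) := pvLoopA tile.toList

-- ===== PORT B =====
-- B's COL dict
def pvColDict : PySem.Dict Char Int := PySem.Dict.ofList [('e', 1), ('w', -1)]

-- B's for-loop over characters with the pending row offset as state.
def pvLoopB : List Char → Int → List (Int × Int)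
  | [], _ => []
  | c :: rest, row =>
    if c = 'n' then pvLoopB rest (-1)
    else if c = 's' then pvLoopB rest 1
    else
      match pvColDict.get? c with
      | some col => (row, if row = 0 then 2 * col else col) :: pvLoopB rest 0
      | none => []             -- KeyError in Python

def parse_tile_alt (tile : String) : List (Int × Int) := pvLoopB tile.toList 0

-- ===== PRECONDITION & SPEC =====
-- Pre_: the string is a concatenation of the six direction tokens
-- e, w, se, sw, ne, nw; on any other string A raises KeyError.
def pvValid : List Char → Bool
  | [] => true
  | [c] => c = 'e' ∨ c = 'w'
  | c :: d :: rest =>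
    if c = 'e' ∨ c = 'w' then pvValid (d :: rest)
    else ((c = 's' ∨ c = 'n') && (d = 'e' ∨ d = 'w')) && pvValid rest

def Pre_parse_tile (tile : String) : Prop := pvValid tile.toList = true
instance (tile : String) : Decidable (Pre_parse_tile tile) := by unfold Pre_parse_tile; infer_instance

def pvWitness_parse_tile : String := "esenwswnee"

def Spec_parse_tile (tile : String) (out : List (Int × Int)) : Prop := out = parse_tile_alt tile
instance (tile : String) (out : List (Int × Int)) : Decidable (Spec_parse_tile tile out) := by unfold Spec_parse_tile; infer_instance

-- ===== CLAIM (what is proved, stated in full; the proofs are below) =====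
def Claim_equal_parse_tile : Prop := ∀ (tile : String), Dom_parse_tile tile → Pre_parse_tile tile → Spec_parse_tile tile (parse_tile tile)

-- ===== LEMMAS AND PROOFS =====

theorem pvLoop_eq : ∀ cs : List Char, pvValid cs = true → pvLoopA cs = pvLoopB cs 0
  | [], _ => rfl
  | [c], h => by
    simp only [pvValid, Bool.decide_or, Bool.or_eq_true, decide_eq_true_eq] at h
    rcases h with rfl | rfl <;>
      simp only [pvLoopA, pvLoopB] <;>
      [rw [show pvColDict.get? 'e' = some (1 : Int) from rfl];
       rw [show pvColDict.get? 'w' = some (-1 : Int) from rfl]] <;>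
      simp
  | c :: d :: rest, h => by
    by_cases he : c = 'e'
    · subst he
      rw [pvValid, if_pos (Or.inl rfl)] at h
      rw [show pvLoopA ('e' :: d :: rest) = (0, 2) :: pvLoopA (d :: rest) from by
            simp [pvLoopA]]
      rw [show ∀ r : List Char, pvLoopB ('e' :: r) 0 = (0, 2) :: pvLoopB r 0 from fun r => by
            rw [pvLoopB]
            rw [show pvColDict.get? 'e' = some (1 : Int) from rfl]
            simp]
      rw [pvLoop_eq (d :: rest) h]
    · by_cases hw : c = 'w'
      · subst hw
        rw [pvValid, if_pos (Or.inr rfl)] at h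
        rw [show pvLoopA ('w' :: d :: rest) = (0, -2) :: pvLoopA (d :: rest) from by
              simp [pvLoopA]]
        rw [show ∀ r : List Char, pvLoopB ('w' :: r) 0 = (0, -2) :: pvLoopB r 0 from fun r => by
              rw [pvLoopB]
              rw [show pvColDict.get? 'w' = some (-1 : Int) from rfl]
              simp]
        rw [pvLoop_eq (d :: rest) h]
      · have hne : ¬ (c = 'e' ∨ c = 'w') := by tauto
        rw [pvValid, if_neg hne] at h
        simp only [Bool.and_eq_true, Bool.decide_or, Bool.or_eq_true, decide_eq_true_eq] at h
        obtain ⟨⟨hc, hd⟩, hrest⟩ := h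
        have ih := pvLoop_eq rest hrest
        rcases hc with rfl | rfl <;> rcases hd with rfl | rfl <;>
          simp only [pvLoopA, pvLoopB, if_neg he, if_neg hw] <;>
          [rw [show pvDictA.get? (String.ofList ['s', 'e']) = some ((1 : Int), (1 : Int)) from rfl,
               show pvColDict.get? 'e' = some (1 : Int) from rfl];
           rw [show pvDictA.get? (String.ofList ['s', 'w']) = some ((1 : Int), (-1 : Int)) from rfl,
               show pvColDict.get? 'w' = some (-1 : Int) from rfl];
           rw [show pvDictA.get? (String.ofList ['n', 'e']) = some ((-1 : Int), (1 : Int)) from rfl,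
               show pvColDict.get? 'e' = some (1 : Int) from rfl];
           rw [show pvDictA.get? (String.ofList ['n', 'w']) = some ((-1 : Int), (-1 : Int)) from rfl,
               show pvColDict.get? 'w' = some (-1 : Int) from rfl]] <;>
          simp [ih]

-- ===== VERDICT (by name: the statement is the Claim_ definition above) =====
theorem parse_tile_spec : Claim_equal_parse_tile := by
  intro tile _ hpre
  unfold Spec_parse_tile parse_tile parse_tile_alt
  exact pvLoop_eq tile.toList hpre
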